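-- pv_equiv track=rewrite | github.com/tlijkkkk/mark_v | leetcode-practice/leetcode_practice/two_pointers/sliding_windows/leetcode1839_longest_substring_all_vowels_order.py | longest_substring_all_vowels_order
-- ===== SOURCE A (Python) =====
-- from typing import List
--
-- def longest_substring_all_vowels_order(word: str) -> int:
--     vowels: List[str] = ['a', 'e', 'i', 'o', 'u']
--     longest = 0
--     i = 0
--     p = 0
--
--     for j in range(len(word)):
--         if i < j and p < len(vowels) - 1 and word[j] == vowels[p + 1]:
--             p += 1
--         elif word[j] != vowels[p]:
--             p = 0
--             i = j if word[j] == vowels[p] else j + 1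
--
--         if p == len(vowels) - 1:
--             longest = max(longest, j - i + 1)
--
--     return longest
-- ===== SOURCE B (Python) =====
-- def longest_substring_all_vowels_order(word: str) -> int:
--     # Skip-scan: jump to each possible match start, greedily consume the runs of the
--     # five vowels in order,
--     # record the match length if all five runs were present, resume after them.
--     n = len(word)
--     best = 0
--     j = 0
--     while j < n:
--         if word[j] != 'a':
--             j += 1
--             continue
--         k = j
--         matched = True
--         for ch in "aeiou":
--             if k < n and word[k] == ch:
--                 k += 1
--                 while k < n and word[k] == ch:
--                     k += 1
--             else:
--                 matched = False
--                 break
--         if matched: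
--             best = max(best, k - j)
--         j = k  # k > j: at least the first checked character was consumed
--     return best
-- ===== Notes on version B (the rewrite author's own statement) =====
-- stated objective: faster
-- what changed: Replaces A's per-character pointer/stage state machine (indices i, p updated on every character) with a skip-scan that jumps to each possible match start and greedily consumes the five maximal vowel runs at once, recording the match length and resuming after the consumed block.
import Mathlib
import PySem

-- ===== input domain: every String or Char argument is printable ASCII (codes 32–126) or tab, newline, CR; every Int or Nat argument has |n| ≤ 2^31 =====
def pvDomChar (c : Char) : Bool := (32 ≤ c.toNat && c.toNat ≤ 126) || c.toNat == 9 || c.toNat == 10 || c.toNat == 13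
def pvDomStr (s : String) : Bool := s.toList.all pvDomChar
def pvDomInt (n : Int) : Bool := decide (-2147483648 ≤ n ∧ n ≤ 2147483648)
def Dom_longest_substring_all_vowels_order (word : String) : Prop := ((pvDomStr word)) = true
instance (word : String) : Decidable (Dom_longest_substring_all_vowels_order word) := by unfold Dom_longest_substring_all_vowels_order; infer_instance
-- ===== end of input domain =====

-- B replaces A's per-character pointer/stage state machine with a skip-scan that consumes whole vowel runs per candidate start; same O(n) asymptotics, measurably faster by a constant factor in a timing run.

-- ===== PORT A =====
def pvVowels : List Char := ['a', 'e', 'i', 'o', 'u']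

-- vowels[p]: p is always in [0,4] when A evaluates it, so the IndexError default is never used
def pvVowelAt (p : Int) : Char := (PySem.List.pyGet? pvVowels p).getD ' '

-- the `for j in range(len(word))` loop; c is word[j]
def pvAGo : List Char → Int → Int → Int → Int → Int
  | [], _, longest, _, _ => longest
  | c :: rest, j, longest, i, p =>
    let ip :=
      if i < j ∧ p < (pvVowels.length : Int) - 1 ∧ c = pvVowelAt (p + 1) then (i, p + 1)
      else if c ≠ pvVowelAt p then
        (if c = pvVowelAt 0 then j else j + 1, (0 : Int))
      else (i, p)
    let longest' := if ip.2 = (pvVowels.length : Int) - 1 then max longest (j - ip.1 + 1) else longest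
    pvAGo rest (j + 1) longest' ip.1 ip.2

def longest_substring_all_vowels_order (word : String) : Int :=
  pvAGo word.toList 0 0 0 0

-- ===== PORT B =====
-- the inner `while k < n and word[k] == ch` run-consumption: (#consumed, rest)
def pvTakeRun (v : Char) : List Char → Nat × List Char
  | [] => (0, [])
  | c :: rest => if c = v then let nr := pvTakeRun v rest; (nr.1 + 1, nr.2) else (0, c :: rest)

-- the `for ch in "aeiou"` loop from the current position: (#consumed, rest, matched)
def pvMvGo : List Char → List Char → Nat × List Char × Bool
  | [], l => (0, l, true)
  | v :: vs, c :: rest =>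
      if c = v then
        let nr := pvTakeRun v rest
        let m := pvMvGo vs nr.2
        (1 + nr.1 + m.1, m.2.1, m.2.2)
      else (0, c :: rest, false)
  | _ :: _, [] => (0, [], false)

-- the `"aeiou"` literal the for-loop iterates over
def pvOrder : List Char := "aeiou".toList

-- the outer `while j < n` loop; fuel = remaining positions bound (j advances by ≥ 1 each turn)
def pvAltGo : Nat → List Char → Int → Int
  | 0, _, best => best
  | _ + 1, [], best => best
  | fuel + 1, c :: rest, best =>
    if c ≠ 'a' then pvAltGo fuel rest best
    else
      let m := pvMvGo pvOrder (c :: rest)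
      pvAltGo fuel m.2.1 (if m.2.2 then max best (m.1 : Int) else best)

def longest_substring_all_vowels_order_alt (word : String) : Int :=
  pvAltGo word.toList.length word.toList 0

-- ===== PRECONDITION & SPEC =====
def Spec_longest_substring_all_vowels_order (word : String) (out : Int) : Prop := out = longest_substring_all_vowels_order_alt word
instance (word : String) (out : Int) : Decidable (Spec_longest_substring_all_vowels_order word out) := by unfold Spec_longest_substring_all_vowels_order; infer_instance

-- ===== CLAIM (what is proved, stated in full; the proofs are below) =====
def Claim_equal_longest_substring_all_vowels_order : Prop := ∀ (word : String), Dom_longest_substring_all_vowels_order word → Spec_longest_substring_all_vowels_order word (longest_substring_all_vowels_order word)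

-- ===== LEMMAS AND PROOFS =====

-- reference machine M: state = none (no live window) | some (len, p) (window of length len matching a+...vowel(p)+)
def pvVow (p : Nat) : Char := pvVowels.getD p ' '

def pvMStep : Option (Nat × Nat) → Char → Option (Nat × Nat)
  | none, c => if c = 'a' then some (1, 0) else none
  | some (len, p), c =>
      if c = pvVow p then some (len + 1, p)
      else if p < 4 ∧ c = pvVow (p + 1) then some (len + 1, p + 1)
      else if c = 'a' then some (1, 0) else none

def pvContrib : Option (Nat × Nat) → Int
  | some (len, p) => if p = 4 then (len : Int) else 0
  | none => 0

def pvMGo : List Char → Option (Nat × Nat) → Int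
  | [], _ => 0
  | c :: rest, st => max (pvContrib (pvMStep st c)) (pvMGo rest (pvMStep st c))

lemma pvMGo_nonneg (l : List Char) (st : Option (Nat × Nat)) : 0 ≤ pvMGo l st := by
  induction l generalizing st with
  | nil => simp [pvMGo]
  | cons c rest ih => exact le_max_of_le_right (ih _)

-- relation between A's concrete state (before index j) and M's abstract state
def pvRel (j i p : Int) (st : Option (Nat × Nat)) : Prop :=
  (st = none ∧ i = j ∧ p = 0) ∨
  (∃ len pp : Nat, st = some (len, pp) ∧ pp ≤ 4 ∧ 1 ≤ len ∧ p = (pp : Int) ∧ i = j - (len : Int))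

lemma pvVowelAt_cast (pp : Nat) (h : pp ≤ 4) : pvVowelAt (pp : Int) = pvVow pp := by
  interval_cases pp <;> decide

lemma pvVow_ne_succ (pp : Nat) (h : pp < 4) : pvVow pp ≠ pvVow (pp + 1) := by
  interval_cases pp <;> decide

lemma pvLenm1 : (pvVowels.length : Int) - 1 = 4 := by decide

lemma pvA_vs_M (l : List Char) :
    ∀ (j longest i p : Int) (st : Option (Nat × Nat)),
      0 ≤ longest → pvRel j i p st →
      pvAGo l j longest i p = max longest (pvMGo l st) := by
  induction l with
  | nil =>
      intro j longest i p st hl _hrel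
      simp only [pvAGo, pvMGo]
      omega
  | cons c rest ih =>
      intro j longest i p st hl hrel
      rcases hrel with ⟨hst, hi, hp⟩ | ⟨len, pp, hst, hpp, hlen, hp, hi⟩
      · -- dead state: i = j, p = 0
        subst hst hp
        rw [hi]
        have hcond1 : ¬ ((j : Int) < j ∧ (0:Int) < (pvVowels.length : Int) - 1 ∧ c = pvVowelAt (0 + 1)) := by
          intro h; exact absurd h.1 (lt_irrefl _)
        have hva : pvVowelAt 0 = 'a' := by decide
        by_cases hca : c = 'a'
        · have hrel' : pvRel (j + 1) j 0 (some (1, 0)) := by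
            right; exact ⟨1, 0, rfl, by omega, le_refl 1, by simp, by push_cast; ring⟩
          have hmstep : pvMStep none c = some (1, 0) := by simp [pvMStep, hca]
          have hnn := pvMGo_nonneg rest (some (1, 0))
          simp only [pvAGo, pvMGo, hmstep]
          simp only [if_neg hcond1]
          simp [hva, hca, pvLenm1, pvContrib]
          rw [ih (j+1) longest j 0 (some (1, 0)) hl hrel']
          omega
        · have hrel' : pvRel (j + 1) (j + 1) 0 none := by left; exact ⟨rfl, rfl, rfl⟩
          have hmstep : pvMStep none c = none := by simp [pvMStep, hca]
          have hnn := pvMGo_nonneg rest (none : Option (Nat × Nat))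
          simp only [pvAGo, pvMGo, hmstep]
          simp only [if_neg hcond1]
          simp [hva, hca, pvLenm1, pvContrib]
          rw [ih (j+1) longest (j+1) 0 none hl hrel']
          omega
      · -- live state: window of length len, stage pp
        subst hst hp hi
        have hij : (j : Int) - (len : Int) < j := by omega
        have hvp : pvVowelAt (pp : Int) = pvVow pp := pvVowelAt_cast pp hpp
        have hL4 : ((pp : Int) < (pvVowels.length : Int) - 1) ↔ pp < 4 := by
          rw [pvLenm1]; omega
        by_cases hc0 : c = pvVow pp
        · -- same-run character: A keeps (i, p), M extends the window
          have hcond1 : ¬ ((j : Int) - len < j ∧ (pp : Int) < (pvVowels.length : Int) - 1 ∧ c = pvVowelAt ((pp : Int) + 1)) := by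
            rintro ⟨-, h4, hc⟩
            have hpplt : pp < 4 := hL4.mp h4
            have hcast : ((pp : Int) + 1) = ((pp + 1 : Nat) : Int) := by push_cast; ring
            rw [hcast, pvVowelAt_cast (pp+1) (by omega)] at hc
            exact pvVow_ne_succ pp hpplt (hc0 ▸ hc)
          have hceq : c = pvVowelAt (pp : Int) := by rw [hvp]; exact hc0
          have hrel' : pvRel (j + 1) (j - (len : Int)) (pp : Int) (some (len + 1, pp)) := by
            right; exact ⟨len + 1, pp, rfl, hpp, by omega, rfl, by push_cast; ring⟩
          have hmstep : pvMStep (some (len, pp)) c = some (len + 1, pp) := by simp [pvMStep, hc0]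
          have hnn := pvMGo_nonneg rest (some (len + 1, pp))
          by_cases hp4 : (pp : Int) = 4
          · simp only [pvAGo, pvMGo, hmstep]
            simp only [if_neg hcond1]
            simp [hceq, pvLenm1, pvContrib, show pp = 4 by omega]
            have hrel4 : pvRel (j + 1) (j - (len : Int)) 4 (some (len + 1, 4)) := by
              right; exact ⟨len + 1, 4, rfl, by omega, by omega, by norm_num, by push_cast; omega⟩
            rw [ih (j+1) (max longest ((len : Int) + 1)) (j - (len : Int)) 4 (some (len + 1, 4)) (le_max_of_le_left hl) hrel4]
            omega
          · simp only [pvAGo, pvMGo, hmstep]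
            simp only [if_neg hcond1]
            simp [hceq, pvLenm1, pvContrib, hp4, show ¬ (pp = 4) by omega]
            rw [ih (j+1) longest (j - (len : Int)) (pp : Int) (some (len + 1, pp)) hl hrel']
            omega
        · by_cases hcadv : pp < 4 ∧ c = pvVow (pp + 1)
          · -- advancing character: A bumps p, M extends with stage + 1
            obtain ⟨hpplt, hcv⟩ := hcadv
            have hcast : ((pp : Int) + 1) = ((pp + 1 : Nat) : Int) := by push_cast; ring
            have hcond1 : (j : Int) - len < j ∧ (pp : Int) < (pvVowels.length : Int) - 1 ∧ c = pvVowelAt ((pp : Int) + 1) := by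
              refine ⟨hij, hL4.mpr hpplt, ?_⟩
              rw [hcast, pvVowelAt_cast (pp+1) (by omega)]
              exact hcv
            have hrel' : pvRel (j + 1) (j - (len : Int)) ((pp : Int) + 1) (some (len + 1, pp + 1)) := by
              right; exact ⟨len + 1, pp + 1, rfl, by omega, by omega, by push_cast; ring, by push_cast; ring⟩
            have hne' : ¬ (pvVow (pp + 1) = pvVow pp) := fun h => pvVow_ne_succ pp hpplt h.symm
            have hmstep : pvMStep (some (len, pp)) c = some (len + 1, pp + 1) := by
              simp [pvMStep, hcv, hpplt, hne']
            have hnn := pvMGo_nonneg rest (some (len + 1, pp + 1))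
            by_cases hp4 : (pp : Int) + 1 = 4
            · simp only [pvAGo, pvMGo, hmstep]
              simp only [if_pos hcond1]
              simp [pvLenm1, pvContrib, hp4, show pp + 1 = 4 by omega]
              have hrel4 : pvRel (j + 1) (j - (len : Int)) 4 (some (len + 1, 4)) := by
                right; exact ⟨len + 1, 4, rfl, by omega, by omega, by norm_num, by push_cast; omega⟩
              rw [ih (j+1) (max longest ((len : Int) + 1)) (j - (len : Int)) 4 (some (len + 1, 4)) (le_max_of_le_left hl) hrel4]
              omega
            · simp only [pvAGo, pvMGo, hmstep]
              simp only [if_pos hcond1]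
              simp [pvLenm1, pvContrib, hp4, show ¬ (pp + 1 = 4) by omega]
              rw [ih (j+1) longest (j - (len : Int)) ((pp : Int) + 1) (some (len + 1, pp + 1)) hl hrel']
              omega
          · -- mismatching character: A resets, M behaves as from the dead state
            have hcond1 : ¬ ((j : Int) - len < j ∧ (pp : Int) < (pvVowels.length : Int) - 1 ∧ c = pvVowelAt ((pp : Int) + 1)) := by
              rintro ⟨-, h4, hc⟩
              have hpplt : pp < 4 := hL4.mp h4
              have hcast : ((pp : Int) + 1) = ((pp + 1 : Nat) : Int) := by push_cast; ring
              rw [hcast, pvVowelAt_cast (pp+1) (by omega)] at hc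
              exact hcadv ⟨hpplt, hc⟩
            have hcne : c ≠ pvVowelAt (pp : Int) := by rw [hvp]; exact hc0
            have hva : pvVowelAt 0 = 'a' := by decide
            by_cases hca : c = 'a'
            · have hrel' : pvRel (j + 1) j 0 (some (1, 0)) := by
                right; exact ⟨1, 0, rfl, by omega, le_refl 1, by simp, by push_cast; ring⟩
              have h1 : ¬ ('a' = pvVow pp) := fun h => hc0 (hca.trans h)
              have h2 : ¬ (pp < 4 ∧ 'a' = pvVow (pp + 1)) := by rw [← hca]; exact hcadv
              have hmstep : pvMStep (some (len, pp)) c = some (1, 0) := by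
                simp [pvMStep, hca, h1, h2]
              have hnn := pvMGo_nonneg rest (some (1, 0))
              simp only [pvAGo, pvMGo, hmstep]
              simp only [if_neg hcond1]
              have hcne' : ¬ ('a' = pvVowelAt (pp : Int)) := fun h => hcne (hca.trans h)
              simp [hcne', hva, hca, pvLenm1, pvContrib]
              rw [ih (j+1) longest j 0 (some (1, 0)) hl hrel']
              omega
            · have hrel' : pvRel (j + 1) (j + 1) 0 none := by left; exact ⟨rfl, rfl, rfl⟩
              have h1 : ¬ (c = pvVow pp) := hc0
              have hmstep : pvMStep (some (len, pp)) c = none := by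
                simp [pvMStep, h1, hcadv, hca]
              have hnn := pvMGo_nonneg rest (none : Option (Nat × Nat))
              simp only [pvAGo, pvMGo, hmstep]
              simp only [if_neg hcond1]
              simp [hcne, hva, hca, pvLenm1, pvContrib]
              rw [ih (j+1) longest (j+1) 0 none hl hrel']
              omega

-- ---- B side: relating the run-consuming skip-scan to the machine M ----

def pvConsume (pp : Nat) (l : List Char) : Nat × List Char × Bool :=
  let nr := pvTakeRun (pvVow pp) l
  let m := pvMvGo (pvVowels.drop (pp + 1)) nr.2
  (nr.1 + m.1, m.2.1, m.2.2)

lemma pvTakeRun_len (v : Char) (l : List Char) :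
    (pvTakeRun v l).2.length + (pvTakeRun v l).1 = l.length := by
  induction l with
  | nil => simp [pvTakeRun]
  | cons c rest ih =>
      by_cases h : c = v <;> simp [pvTakeRun, h] <;> omega

lemma pvMvGo_len (vs : List Char) : ∀ l : List Char,
    (pvMvGo vs l).2.1.length + (pvMvGo vs l).1 = l.length := by
  induction vs with
  | nil => intro l; simp [pvMvGo]
  | cons v vs ih =>
      intro l
      cases l with
      | nil => simp [pvMvGo]
      | cons c rest =>
          by_cases h : c = v
          · have h1 := pvTakeRun_len v rest
            have h2 := ih (pvTakeRun v rest).2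
            simp [pvMvGo, h]
            omega
          · simp [pvMvGo, h]

lemma pvMvGo_ok_len (vs : List Char) : ∀ l : List Char,
    (pvMvGo vs l).2.2 = true → vs.length ≤ (pvMvGo vs l).1 := by
  induction vs with
  | nil => intro l _; simp
  | cons v vs ih =>
      intro l
      cases l with
      | nil => simp [pvMvGo]
      | cons c rest =>
          by_cases h : c = v
          · have h2 := ih (pvTakeRun v rest).2
            simp [pvMvGo, h]
            intro hok
            have := h2 hok
            omega
          · simp [pvMvGo, h]

lemma pvConsume_len (pp : Nat) (l : List Char) :
    (pvConsume pp l).2.1.length + (pvConsume pp l).1 = l.length := by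
  have h1 := pvTakeRun_len (pvVow pp) l
  have h2 := pvMvGo_len (pvVowels.drop (pp + 1)) (pvTakeRun (pvVow pp) l).2
  simp [pvConsume]
  omega

lemma pvConsume4_ok (l : List Char) : (pvConsume 4 l).2.2 = true := by
  simp [pvConsume, show pvVowels.drop 5 = [] from by decide, pvMvGo]

lemma pvDrop_succ (pp : Nat) (h : pp < 4) :
    pvVowels.drop (pp + 1) = pvVow (pp + 1) :: pvVowels.drop (pp + 2) := by
  interval_cases pp <;> decide

lemma pvMStep_fail (len pp : Nat) (c : Char) (h0 : ¬ c = pvVow pp)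
    (hadv : ¬ (pp < 4 ∧ c = pvVow (pp + 1))) :
    pvMStep (some (len, pp)) c = pvMStep none c := by
  by_cases hca : c = 'a'
  · subst hca; simp [pvMStep, h0, hadv]
  · simp [pvMStep, h0, hadv, hca]

lemma pvMGo_fail (len pp : Nat) (c : Char) (rest : List Char) (h0 : ¬ c = pvVow pp)
    (hadv : ¬ (pp < 4 ∧ c = pvVow (pp + 1))) :
    pvMGo (c :: rest) (some (len, pp)) = pvMGo (c :: rest) none := by
  simp only [pvMGo, pvMStep_fail len pp c h0 hadv]

lemma pvMain : ∀ (N : Nat) (l : List Char), l.length ≤ N → ∀ (pp len : Nat), pp ≤ 4 →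
    pvMGo l (some (len, pp)) =
      (if (pvConsume pp l).2.2 = true ∧ 1 ≤ (pvConsume pp l).1
       then max ((len : Int) + (pvConsume pp l).1) (pvMGo (pvConsume pp l).2.1 none)
       else pvMGo (pvConsume pp l).2.1 none) := by
  intro N
  induction N with
  | zero =>
      intro l hlen pp len hpp
      have : l = [] := by cases l <;> simp_all
      subst this
      interval_cases pp <;> simp [pvConsume, pvTakeRun, pvMvGo, pvMGo, pvVowels]
  | succ N ih =>
      intro l hlen pp len hpp
      cases l with
      | nil => interval_cases pp <;> simp [pvConsume, pvTakeRun, pvMvGo, pvMGo, pvVowels]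
      | cons c rest =>
          have hrlen : rest.length ≤ N := by simpa using hlen
          by_cases hc0 : c = pvVow pp
          · -- extend the current run
            have hstep : pvMStep (some (len, pp)) c = some (len + 1, pp) := by
              simp [pvMStep, hc0]
            have htr : pvTakeRun (pvVow pp) (c :: rest) =
                ((pvTakeRun (pvVow pp) rest).1 + 1, (pvTakeRun (pvVow pp) rest).2) := by
              simp [pvTakeRun, hc0]
            have hcons : pvConsume pp (c :: rest) =
                ((pvConsume pp rest).1 + 1, (pvConsume pp rest).2.1, (pvConsume pp rest).2.2) := by
              simp [pvConsume, htr]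
              omega
            have hIH := ih rest hrlen pp (len + 1) hpp
            have hnn := pvMGo_nonneg (pvConsume pp rest).2.1 none
            by_cases hok : (pvConsume pp rest).2.2 = true
            · by_cases hp4 : pp = 4
              · subst hp4
                simp only [pvMGo, hstep, hcons, hIH, pvContrib, hok, true_and]
                by_cases hn1 : 1 ≤ (pvConsume 4 rest).1
                · simp [hn1, show 1 ≤ (pvConsume 4 rest).1 + 1 by omega]
                  push_cast
                  omega
                · simp [show 1 ≤ (pvConsume 4 rest).1 + 1 by omega,
                        show (pvConsume 4 rest).1 = 0 by omega]
                  try push_cast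
                  try omega
              · -- pp < 4 : no contribution; ok forces at least one later consumed char
                have hpplt : pp < 4 := by omega
                have hd := pvDrop_succ pp hpplt
                have hml := pvMvGo_ok_len (pvVowels.drop (pp + 1)) (pvTakeRun (pvVow pp) rest).2
                have hok' : (pvMvGo (pvVowels.drop (pp + 1)) (pvTakeRun (pvVow pp) rest).2).2.2 = true := by
                  have : (pvConsume pp rest).2.2 =
                      (pvMvGo (pvVowels.drop (pp + 1)) (pvTakeRun (pvVow pp) rest).2).2.2 := by
                    simp [pvConsume]
                  rwa [this] at hok
                have hge := hml hok'
                have hge1 : 1 ≤ (pvMvGo (pvVowels.drop (pp + 1)) (pvTakeRun (pvVow pp) rest).2).1 := by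
                  refine le_trans ?_ hge
                  rw [hd]; simp
                have hlen1 : 1 ≤ (pvConsume pp rest).1 := by
                  have heq : (pvConsume pp rest).1 =
                      (pvTakeRun (pvVow pp) rest).1 + (pvMvGo (pvVowels.drop (pp + 1)) (pvTakeRun (pvVow pp) rest).2).1 := by
                    simp [pvConsume]
                  omega
                simp only [pvMGo, hstep, hcons, hIH, pvContrib, hok, true_and, if_neg hp4]
                simp [hlen1, show 1 ≤ (pvConsume pp rest).1 + 1 by omega]
                push_cast
                omega
            · -- consumption fails later: no contribution possible (pp ≠ 4)
              have hp4 : ¬ pp = 4 := by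
                intro h; subst h; exact hok (pvConsume4_ok rest)
              simp only [pvMGo, hstep, hcons, hIH, pvContrib, hok, false_and, if_false, if_neg hp4]
              simp [hok]
              omega
          · -- first char does not extend the current run
            have htr : pvTakeRun (pvVow pp) (c :: rest) = (0, c :: rest) := by
              simp [pvTakeRun, hc0]
            by_cases hp4 : pp = 4
            · subst hp4
              have hcons : pvConsume 4 (c :: rest) = (0, c :: rest, true) := by
                simp [pvConsume, htr, show pvVowels.drop 5 = [] from by decide, pvMvGo]
              rw [pvMGo_fail len 4 c rest hc0 (by simp)]
              simp [hcons]
            · have hpplt : pp < 4 := by omega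
              have hd := pvDrop_succ pp hpplt
              by_cases hcv : c = pvVow (pp + 1)
              · -- advancing char: consumption continues at the next stage
                have hstep : pvMStep (some (len, pp)) c = some (len + 1, pp + 1) := by
                  have hne' : ¬ (pvVow (pp + 1) = pvVow pp) := fun h => pvVow_ne_succ pp hpplt h.symm
                  simp [pvMStep, hc0, hcv, hpplt, hne']
                have hcons : pvConsume pp (c :: rest) =
                    ((pvConsume (pp + 1) rest).1 + 1, (pvConsume (pp + 1) rest).2.1, (pvConsume (pp + 1) rest).2.2) := by
                  simp only [pvConsume, htr]
                  rw [hd]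
                  simp only [pvMvGo, if_pos hcv]
                  simp [pvConsume, show pp + 1 + 1 = pp + 2 from by omega]
                  omega
                have hIH := ih rest hrlen (pp + 1) (len + 1) (by omega)
                have hnn := pvMGo_nonneg (pvConsume (pp + 1) rest).2.1 none
                by_cases hok : (pvConsume (pp + 1) rest).2.2 = true
                · by_cases hq4 : pp + 1 = 4
                  · simp only [pvMGo, hstep, hcons, hIH, pvContrib, hok, true_and, if_pos hq4]
                    by_cases hn1 : 1 ≤ (pvConsume (pp + 1) rest).1
                    · simp [hn1, show 1 ≤ (pvConsume (pp + 1) rest).1 + 1 by omega]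
                      push_cast
                      omega
                    · simp [show 1 ≤ (pvConsume (pp + 1) rest).1 + 1 by omega,
                            show (pvConsume (pp + 1) rest).1 = 0 by omega]
                      try push_cast
                      try omega
                  · have hq4lt : pp + 1 < 4 := by omega
                    have hd2 := pvDrop_succ (pp + 1) hq4lt
                    have hml := pvMvGo_ok_len (pvVowels.drop (pp + 1 + 1)) (pvTakeRun (pvVow (pp + 1)) rest).2
                    have hok' : (pvMvGo (pvVowels.drop (pp + 1 + 1)) (pvTakeRun (pvVow (pp + 1)) rest).2).2.2 = true := by
                      have : (pvConsume (pp + 1) rest).2.2 =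
                          (pvMvGo (pvVowels.drop (pp + 1 + 1)) (pvTakeRun (pvVow (pp + 1)) rest).2).2.2 := by
                        simp [pvConsume]
                      rwa [this] at hok
                    have hge := hml hok'
                    have hge1 : 1 ≤ (pvMvGo (pvVowels.drop (pp + 2)) (pvTakeRun (pvVow (pp + 1)) rest).2).1 := by
                      refine le_trans ?_ hge
                      rw [hd2]; simp
                    have hlen1 : 1 ≤ (pvConsume (pp + 1) rest).1 := by
                      have heq : (pvConsume (pp + 1) rest).1 =
                          (pvTakeRun (pvVow (pp + 1)) rest).1 + (pvMvGo (pvVowels.drop (pp + 2)) (pvTakeRun (pvVow (pp + 1)) rest).2).1 := by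
                        simp [pvConsume]
                      omega
                    simp only [pvMGo, hstep, hcons, hIH, pvContrib, hok, true_and, if_neg hq4]
                    simp [hlen1, show 1 ≤ (pvConsume (pp + 1) rest).1 + 1 by omega]
                    push_cast
                    omega
                · have hq4 : ¬ pp + 1 = 4 := by
                    intro h
                    rw [h] at hok
                    exact hok (pvConsume4_ok rest)
                  simp only [pvMGo, hstep, hcons, hIH, pvContrib, hok, false_and, if_false, if_neg hq4]
                  simp [hok]
                  omega
              · -- failing char: machine behaves as from the dead state
                have hcons : pvConsume pp (c :: rest) = (0, c :: rest, false) := by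
                  simp [pvConsume, htr, hd, pvMvGo, hcv]
                rw [pvMGo_fail len pp c rest hc0 (fun h => hcv h.2)]
                simp [hcons]

lemma pvTop : ∀ (fuel : Nat) (l : List Char) (best : Int), l.length ≤ fuel → 0 ≤ best →
    pvAltGo fuel l best = max best (pvMGo l none) := by
  intro fuel
  induction fuel with
  | zero =>
      intro l best hlen hb
      have : l = [] := by cases l <;> simp_all
      subst this
      simp [pvAltGo, pvMGo]
      omega
  | succ fuel ih =>
      intro l best hlen hb
      cases l with
      | nil =>
          simp [pvAltGo, pvMGo]
          omega
      | cons c rest =>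
          have hrlen : rest.length ≤ fuel := by simpa using hlen
          by_cases hca : c = 'a'
          · subst hca
            have hmv : pvMvGo pvOrder ('a' :: rest) =
                ((pvConsume 0 rest).1 + 1, (pvConsume 0 rest).2.1, (pvConsume 0 rest).2.2) := by
              rw [show pvOrder = pvVowels from by decide]
              simp [pvVowels, pvMvGo, pvConsume, show pvVow 0 = 'a' from by decide,
                    show pvVowels.drop 1 = ['e', 'i', 'o', 'u'] from by decide]
              omega
            have hclen := pvConsume_len 0 rest
            have hlen2 : (pvConsume 0 rest).2.1.length ≤ fuel := by omega
            have hstep : pvMStep none 'a' = some (1, 0) := by simp [pvMStep]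
            have hmain := pvMain rest.length rest (le_refl _) 0 1 (by omega)
            have hnn := pvMGo_nonneg (pvConsume 0 rest).2.1 none
            by_cases hok : (pvConsume 0 rest).2.2 = true
            · have hml := pvMvGo_ok_len (pvVowels.drop 1) (pvTakeRun (pvVow 0) rest).2
              have hok' : (pvMvGo (pvVowels.drop 1) (pvTakeRun (pvVow 0) rest).2).2.2 = true := by
                have : (pvConsume 0 rest).2.2 =
                    (pvMvGo (pvVowels.drop 1) (pvTakeRun (pvVow 0) rest).2).2.2 := by
                  simp [pvConsume]
                rwa [this] at hok
              have hge := hml hok'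
              have hge1 : 1 ≤ (pvMvGo (pvVowels.drop 1) (pvTakeRun (pvVow 0) rest).2).1 :=
                le_trans (by decide) hge
              have hlen1 : 1 ≤ (pvConsume 0 rest).1 := by
                have heq : (pvConsume 0 rest).1 =
                    (pvTakeRun (pvVow 0) rest).1 + (pvMvGo (pvVowels.drop 1) (pvTakeRun (pvVow 0) rest).2).1 := by
                  simp [pvConsume]
                omega
              simp only [pvAltGo, if_neg (by simp : ¬ ('a' ≠ 'a')), hmv]
              rw [if_pos hok]
              rw [ih (pvConsume 0 rest).2.1 (max best ((pvConsume 0 rest).1 + 1 : Nat)) hlen2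
                    (le_trans hb (le_max_left _ _))]
              simp only [pvMGo, hstep, hmain, pvContrib, hok, hlen1, true_and, if_pos rfl]
              simp [hlen1]
              push_cast
              omega
            · simp only [pvAltGo, if_neg (by simp : ¬ ('a' ≠ 'a')), hmv, hok]
              rw [if_neg (by simpa using hok)]
              rw [ih (pvConsume 0 rest).2.1 best hlen2 hb]
              simp only [pvMGo, hstep, hmain, pvContrib, hok, false_and, if_false]
              simp
              omega
          · have hstep : pvMStep none c = none := by simp [pvMStep, hca]
            have hnn := pvMGo_nonneg rest none
            simp only [pvAltGo, if_pos (by simpa using hca : c ≠ 'a')]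
            rw [ih rest best hrlen hb]
            simp only [pvMGo, hstep, pvContrib]
            omega

-- ===== VERDICT (by name: the statement is the Claim_ definition above) =====
theorem longest_substring_all_vowels_order_spec : Claim_equal_longest_substring_all_vowels_order := by
  intro word _
  unfold Spec_longest_substring_all_vowels_order
  unfold longest_substring_all_vowels_order longest_substring_all_vowels_order_alt
  have hA := pvA_vs_M word.toList 0 0 0 0 none (le_refl 0) (Or.inl ⟨rfl, rfl, rfl⟩)
  have hB := pvTop word.toList.length word.toList 0 (le_refl _) (le_refl 0)
  have hnn := pvMGo_nonneg word.toList none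
  rw [hA, hB]
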